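-- pv_equiv track=rewrite | github.com/pypi-data/pypi-mirror-398 | packages/botrun-flow-lang/botrun_flow_lang-5.12.261-py3-none-any.whl/botrun_flow_lang/langgraph_agents/agents/search_agent_graph.py | clean_msg_for_search
-- ===== SOURCE A (Python) =====
-- def clean_msg_for_search(messages):
--     """
--     - 移除 content 為空字串 / 空白 的訊息
--     - 合併連續同角色 (只保留區段中的最後一筆)
--     - 最後一筆一定為 user，否則往前尋找最近的 user
--     """
--     cleaned_msg = []
--
--     def is_empty(msg):
--         return str(msg.get("content", "")).strip() == ""
--
--     for msg in messages:
--         if is_empty(msg):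
--             continue
--         if cleaned_msg and cleaned_msg[-1]["role"] == msg["role"]:
--             cleaned_msg[-1] = msg
--         else:
--             cleaned_msg.append(msg)
--
--     while cleaned_msg and cleaned_msg[-1]["role"] != "user":
--         cleaned_msg.pop()
--
--     return cleaned_msg
-- ===== SOURCE B (Python) =====
-- def clean_msg_for_search(messages):
--     # filter, keep last of each same-role run by lookahead, slice to last user
--     filtered = [m for m in messages if str(m.get("content", "")).strip() != ""]
--     merged = []
--     for i, m in enumerate(filtered):
--         if i + 1 == len(filtered) or filtered[i + 1]["role"] != m["role"]:
--             merged.append(m)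
--     last_user = -1
--     for i, m in enumerate(merged):
--         if m["role"] == "user":
--             last_user = i
--     return merged[:last_user + 1]
-- ===== Notes on version B (the rewrite author's own statement) =====
-- stated objective: alternative
-- what changed: Replaces A's single accumulator loop (overwrite-last on same role) plus destructive pop-from-end loop with a three-stage pipeline: filter non-empty messages, keep the last message of each same-role run via lookahead, and slice the merged list up to the last 'user' message.
import Mathlib
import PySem

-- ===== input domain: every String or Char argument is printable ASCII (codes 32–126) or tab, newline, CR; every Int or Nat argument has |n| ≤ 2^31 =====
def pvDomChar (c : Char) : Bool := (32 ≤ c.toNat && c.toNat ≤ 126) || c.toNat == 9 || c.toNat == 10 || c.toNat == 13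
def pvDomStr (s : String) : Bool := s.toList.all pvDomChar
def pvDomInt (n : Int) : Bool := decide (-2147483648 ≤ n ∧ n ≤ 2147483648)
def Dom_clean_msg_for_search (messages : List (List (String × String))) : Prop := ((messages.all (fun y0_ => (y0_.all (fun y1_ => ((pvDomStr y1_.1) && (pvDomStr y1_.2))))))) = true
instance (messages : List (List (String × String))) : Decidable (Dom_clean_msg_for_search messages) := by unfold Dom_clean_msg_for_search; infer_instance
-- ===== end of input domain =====

-- B replaces A's overwrite-last accumulator loop and destructive pop-from-end loop by a
-- filter / keep-last-of-run-by-lookahead / slice-to-last-user pipeline (alternative decomposition, same cost).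


-- ===== PORT A =====
-- shared helper: dict lookup with default (msg.get(k, d); first match = Python dict semantics,
-- unique keys in a real dict).  Under Pre_ the "role" key is present wherever it is read,
-- so the default "" is never the returned value there.
def msgGetD (m : List (String × String)) (k d : String) : String :=
  match m.find? (fun p => p.1 == k) with
  | some p => p.2
  | none => d

-- is_empty(msg): str(msg.get("content","")).strip() == ""  (str() is the identity on a str)
def msgIsEmpty (m : List (String × String)) : Bool :=
  PySem.Str.strip (msgGetD m "content" "") == ""

-- the body of A's for-loop
def stepA (acc : List (List (String × String))) (m : List (String × String)) :
    List (List (String × String)) :=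
  if msgIsEmpty m then acc
  else
    match acc.getLast? with
    | some last =>
        if msgGetD last "role" "" == msgGetD m "role" "" then acc.dropLast ++ [m]
        else acc ++ [m]
    | none => acc ++ [m]

-- A's while-loop 'while cleaned and cleaned[-1]["role"] != "user": cleaned.pop()',
-- transcribed on the reversed list (pop = drop the head of the reverse)
def trimRevA : List (List (String × String)) → List (List (String × String))
  | [] => []
  | m :: rest => if msgGetD m "role" "" == "user" then m :: rest else trimRevA rest

def clean_msg_for_search (messages : List (List (String × String))) :
    List (List (String × String)) :=
  (trimRevA ((messages.foldl stepA []).reverse)).reverse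

-- ===== PORT B =====
-- keep m iff it is the last of its same-role run (lookahead on the next element)
def mergeRunsB : List (List (String × String)) → List (List (String × String))
  | [] => []
  | [m] => [m]
  | m :: n :: rest =>
      if msgGetD n "role" "" == msgGetD m "role" "" then mergeRunsB (n :: rest)
      else m :: mergeRunsB (n :: rest)

-- last index i with merged[i]["role"] == "user", -1 if none (B's second enumerate loop)
def lastUserIdxB (merged : List (List (String × String))) : Int :=
  (PySem.List.enumerate merged 0).foldl
    (fun acc p => if msgGetD p.2 "role" "" == "user" then p.1 else acc) (-1)

def clean_msg_for_search_alt (messages : List (List (String × String))) :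
    List (List (String × String)) :=
  let filtered := messages.filter (fun m => !msgIsEmpty m)
  let merged := mergeRunsB filtered
  -- merged[:last_user+1] with last_user+1 ≥ 0 is take (last_user+1)
  merged.take (lastUserIdxB merged + 1).toNat

-- ===== PRECONDITION & SPEC =====
-- Pre_ excludes exactly the inputs on which the Python raises KeyError: a message whose
-- stripped content is non-empty must carry a "role" key (A reads msg["role"] on those).
def Pre_clean_msg_for_search (messages : List (List (String × String))) : Prop :=
  ∀ m ∈ messages, ¬ msgIsEmpty m = true → (m.find? (fun p => p.1 == "role")).isSome = true
instance (messages : List (List (String × String))) : Decidable (Pre_clean_msg_for_search messages) := by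
  unfold Pre_clean_msg_for_search; infer_instance

def pvWitness_clean_msg_for_search : (List (List (String × String))) :=
  [[("role", "user"), ("content", "hi")], [("role", "assistant"), ("content", "yo")],
   [("content", "  ")], [("role", "user"), ("content", "ok")]]

def Spec_clean_msg_for_search (messages : List (List (String × String))) (out : List (List (String × String))) : Prop := out = clean_msg_for_search_alt messages
instance (messages : List (List (String × String))) (out : List (List (String × String))) : Decidable (Spec_clean_msg_for_search messages out) := by unfold Spec_clean_msg_for_search; infer_instance

-- ===== CLAIM (what is proved, stated in full; the proofs are below) =====
def Claim_equal_clean_msg_for_search : Prop := ∀ (messages : List (List (String × String))), Dom_clean_msg_for_search messages → Pre_clean_msg_for_search messages → Spec_clean_msg_for_search messages (clean_msg_for_search messages)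

-- ===== LEMMAS AND PROOFS =====

-- stepA without the emptiness test
def stepB (acc : List (List (String × String))) (m : List (String × String)) :
    List (List (String × String)) :=
  match acc.getLast? with
  | some last =>
      if msgGetD last "role" "" == msgGetD m "role" "" then acc.dropLast ++ [m]
      else acc ++ [m]
  | none => acc ++ [m]

lemma foldl_stepA_filter (l : List (List (String × String)))
    (acc : List (List (String × String))) :
    l.foldl stepA acc = (l.filter (fun m => !msgIsEmpty m)).foldl stepB acc := by
  induction l generalizing acc with
  | nil => rfl
  | cons m l ih =>
      by_cases h : msgIsEmpty m
      · simp [h, ih, stepA]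
      · simp [h, ih]
        congr 1
        simp [stepA, stepB, h]

lemma stepB_ne_nil (acc : List (List (String × String))) (m : List (String × String)) :
    stepB acc m ≠ [] := by
  unfold stepB
  cases h : acc.getLast? <;> simp
  split <;> simp

lemma stepB_prefix (a : List (List (String × String)))
    (s : List (List (String × String))) (hs : s ≠ []) (m : List (String × String)) :
    stepB (a ++ s) m = a ++ stepB s m := by
  obtain ⟨ys, y, rfl⟩ := s.eq_nil_or_concat.resolve_left hs
  unfold stepB
  simp only [List.concat_eq_append, ← List.append_assoc, List.getLast?_concat,
    List.dropLast_concat]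
  split <;> simp

lemma foldl_stepB_prefix (l : List (List (String × String)))
    (a s : List (List (String × String))) (hs : s ≠ []) :
    l.foldl stepB (a ++ s) = a ++ l.foldl stepB s := by
  induction l generalizing s with
  | nil => rfl
  | cons m l ih =>
      simp only [List.foldl_cons, stepB_prefix a s hs m]
      exact ih _ (stepB_ne_nil s m)

lemma foldl_stepB_eq_mergeRuns (l : List (List (String × String)))
    (a : List (String × String)) :
    l.foldl stepB [a] = mergeRunsB (a :: l) := by
  induction l generalizing a with
  | nil => rfl
  | cons m l ih =>
      have hstep : stepB [a] m =
          if msgGetD a "role" "" == msgGetD m "role" "" then [m] else [a, m] := by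
        unfold stepB; simp
      simp only [List.foldl_cons, hstep]
      by_cases h : msgGetD a "role" "" = msgGetD m "role" ""
      · have h' : (msgGetD m "role" "" == msgGetD a "role" "") = true := by
          simp [h]
        simp [h, mergeRunsB, ih m]
      · have h' : (msgGetD m "role" "" == msgGetD a "role" "") = false := by
          simp; exact fun e => h e.symm
        have : ([a, m] : List (List (String × String))) = [a] ++ [m] := rfl
        simp only [beq_iff_eq, h, if_false, this,
          foldl_stepB_prefix l [a] [m] (by simp), ih m, mergeRunsB, h']
        simp

-- the merge phases agree
lemma merge_eq (messages : List (List (String × String))) :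
    (messages.foldl stepA []) =
      mergeRunsB (messages.filter (fun m => !msgIsEmpty m)) := by
  rw [foldl_stepA_filter]
  cases h : messages.filter (fun m => !msgIsEmpty m) with
  | nil => rfl
  | cons a l =>
      have : ([] : List (List (String × String))).foldl stepB [] = [] := rfl
      show (a :: l).foldl stepB [] = _
      have : stepB [] a = [a] := by unfold stepB; simp
      simp only [List.foldl_cons, this, foldl_stepB_eq_mergeRuns]

-- bounds on lastUserIdxB, via the enumerate fold with general start and init
lemma foldl_last_bounds (l : List (List (String × String))) (s : Int) (init : Int)
    (h1 : -1 ≤ init) (h2 : init < s) :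
    -1 ≤ (PySem.List.enumerate l s).foldl
        (fun acc p => if msgGetD p.2 "role" "" == "user" then p.1 else acc) init ∧
      (PySem.List.enumerate l s).foldl
        (fun acc p => if msgGetD p.2 "role" "" == "user" then p.1 else acc) init < s + l.length := by
  induction l generalizing s init with
  | nil => simpa using ⟨h1, by omega⟩
  | cons m l ih =>
      rw [PySem.List.enumerate_cons]
      simp only [List.foldl_cons, List.length_cons]
      by_cases h : (msgGetD m "role" "" == "user") = true
      · rw [if_pos h]
        have h3 := ih (s + 1) s (by omega) (by omega)
        exact ⟨h3.1, by have := h3.2; push_cast at this ⊢; omega⟩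
      · rw [if_neg h]
        have h3 := ih (s + 1) init h1 (by omega)
        exact ⟨h3.1, by have := h3.2; push_cast at this ⊢; omega⟩

-- the trim phases agree, by induction on the merged list from the right
lemma trim_eq (M : List (List (String × String))) :
    (trimRevA M.reverse).reverse = M.take (lastUserIdxB M + 1).toNat := by
  induction M using List.reverseRecOn with
  | nil => rfl
  | append_singleton M m ih =>
      have hstep : lastUserIdxB (M ++ [m]) =
          if msgGetD m "role" "" == "user" then (M.length : Int) else lastUserIdxB M := by
        unfold lastUserIdxB
        rw [PySem.List.enumerate_append]
        simp [PySem.List.enumerate_cons]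
      by_cases h : msgGetD m "role" "" = "user"
      · rw [List.reverse_append]
        simp only [List.reverse_cons, List.reverse_nil, List.nil_append, List.singleton_append,
          trimRevA, h, beq_self_eq_true, if_true, hstep]
        simp [List.take_of_length_le, List.length_append]
      · have hb := foldl_last_bounds M 0 (-1) (by omega) (by omega)
        have hb' : lastUserIdxB M < (M.length : Int) := by
          have := hb.2; unfold lastUserIdxB; omega
        have hb1 : -1 ≤ lastUserIdxB M := hb.1
        rw [List.reverse_append]
        simp only [List.reverse_cons, List.reverse_nil, List.nil_append, List.singleton_append,
          trimRevA, hstep]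
        simp only [beq_iff_eq, h, if_false]
        rw [ih, List.take_append_of_le_length]
        omega

-- ===== VERDICT (by name: the statement is the Claim_ definition above) =====
theorem clean_msg_for_search_spec : Claim_equal_clean_msg_for_search := by
  intro messages _ _
  show clean_msg_for_search messages = clean_msg_for_search_alt messages
  unfold clean_msg_for_search clean_msg_for_search_alt
  rw [merge_eq, trim_eq]
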